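-- pv_equiv track=rewrite | github.com/jeongrok/Algorithms | CCC/Lifeguard.py | days_covered
-- ===== SOURCE A (Python) =====
-- def days_covered(intervals, fired):
--     covered = set()
--     for i in range(len(intervals)):
--         if i != fired:
--             interval = intervals[i]
--             for j in range(interval[0], interval[1]):
--                 covered.add(j)
--     return(len(covered))
-- ===== SOURCE B (Python) =====
-- def days_covered(intervals, fired):
--     kept = []
--     for i, iv in enumerate(intervals):
--         if i != fired and iv[0] < iv[1]:
--             kept.append((iv[0], iv[1]))
--     kept.sort(key=lambda t: t[0])
--     total = 0
--     lo = None
--     hi = None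
--     for a, b in kept:
--         if hi is None or a > hi:
--             if hi is not None:
--                 total += hi - lo
--             lo, hi = a, b
--         else:
--             if b > hi:
--                 hi = b
--     if hi is not None:
--         total += hi - lo
--     return total
-- ===== Notes on version B (the rewrite author's own statement) =====
-- stated objective: faster
-- what changed: B replaces A's day-by-day filling of a set over every interval's whole span by sort-the-kept-intervals-by-start plus a single merge sweep that sums the lengths of merged runs.
import Mathlib
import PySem

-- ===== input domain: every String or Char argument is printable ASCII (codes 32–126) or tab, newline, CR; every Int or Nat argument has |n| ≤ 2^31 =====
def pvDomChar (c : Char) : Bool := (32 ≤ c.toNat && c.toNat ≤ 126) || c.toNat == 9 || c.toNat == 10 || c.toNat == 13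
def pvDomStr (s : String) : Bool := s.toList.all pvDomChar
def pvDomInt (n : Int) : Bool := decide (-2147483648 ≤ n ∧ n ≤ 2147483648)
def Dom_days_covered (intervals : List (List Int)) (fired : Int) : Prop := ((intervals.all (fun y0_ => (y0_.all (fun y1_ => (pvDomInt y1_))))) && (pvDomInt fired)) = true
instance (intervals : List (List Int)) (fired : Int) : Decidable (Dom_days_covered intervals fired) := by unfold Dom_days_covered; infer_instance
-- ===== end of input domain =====

-- B replaces A's day-by-day set filling (O(N·L) where L is the total day span) by
-- sort-by-start + merge sweep summing union lengths (O(N log N)); same return value.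

-- ===== PORT A =====
-- literal transliteration of A: build a set of covered days, one day at a time.
-- Python's 'set' is a hash set and only 'add' and 'len' are used, so 'covered' is a
-- Std.HashSet Int (PySem.Set's list representation cannot be evaluated on large day spans).
def days_covered (intervals : List (List Int)) (fired : Int) : Int :=
  let covered : Std.HashSet Int :=
    (PySem.List.pyRange 0 (intervals.length : Int)).foldl
      (fun covered i =>
        if i ≠ fired then
          let interval := PySem.List.pyGetD intervals i []
          (PySem.List.pyRange (PySem.List.pyGetD interval 0 0) (PySem.List.pyGetD interval 1 0)).foldl
            (fun covered j => covered.insert j) covered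
        else covered)
      Std.HashSet.emptyWithCapacity
  (covered.size : Int)

-- ===== PORT B =====
-- the 'for a, b in kept' sweep of Source B: state = (total, current run as Option (lo, hi));
-- the [] cases are Source B's final 'if hi is not None: total += hi - lo'
def pvSweep : List (Int × Int) → Int → Option (Int × Int) → Int
  | [], total, none => total
  | [], total, some (lo, hi) => total + (hi - lo)
  | (a, b) :: rest, total, none => pvSweep rest total (some (a, b))
  | (a, b) :: rest, total, some (lo, hi) =>
    if a > hi then pvSweep rest (total + (hi - lo)) (some (a, b))
    else pvSweep rest total (some (lo, if b > hi then b else hi))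

def days_covered_alt (intervals : List (List Int)) (fired : Int) : Int :=
  let kept : List (Int × Int) :=
    (PySem.List.enumerate intervals).foldl
      (fun acc p =>
        if p.1 ≠ fired ∧ PySem.List.pyGetD p.2 0 0 < PySem.List.pyGetD p.2 1 0 then
          acc ++ [(PySem.List.pyGetD p.2 0 0, PySem.List.pyGetD p.2 1 0)]
        else acc)
      []
  let sortedKept := PySem.List.sorted kept (fun t => t.1)
  pvSweep sortedKept 0 none

-- ===== PRECONDITION & SPEC =====
-- Pre_ excludes exactly the inputs where Python A raises IndexError: a non-fired interval
-- with fewer than 2 entries (interval[0] / interval[1] fails); B raises there too.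
def Pre_days_covered (intervals : List (List Int)) (fired : Int) : Prop :=
  ∀ p ∈ intervals.zipIdx, (p.2 : Int) ≠ fired → 2 ≤ p.1.length
instance (intervals : List (List Int)) (fired : Int) : Decidable (Pre_days_covered intervals fired) := by unfold Pre_days_covered; infer_instance
def pvWitness_days_covered : List (List Int) × Int := ([[0, 3], [2, 5], [9, 9]], 1)

def Spec_days_covered (intervals : List (List Int)) (fired : Int) (out : Int) : Prop := out = days_covered_alt intervals fired
instance (intervals : List (List Int)) (fired : Int) (out : Int) : Decidable (Spec_days_covered intervals fired out) := by unfold Spec_days_covered; infer_instance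

-- ===== CLAIM (what is proved, stated in full; the proofs are below) =====
def Claim_equal_days_covered : Prop := ∀ (intervals : List (List Int)) (fired : Int), Dom_days_covered intervals fired → Pre_days_covered intervals fired → Spec_days_covered intervals fired (days_covered intervals fired)

-- ===== LEMMAS AND PROOFS =====

-- the (start, stop) pairs of all non-fired intervals, in order
def pvKeptAll (intervals : List (List Int)) (fired : Int) : List (Int × Int) :=
  ((PySem.List.enumerate intervals).filter (fun p => decide (p.1 ≠ fired))).map
    (fun p => (PySem.List.pyGetD p.2 0 0, PySem.List.pyGetD p.2 1 0))

-- the set of days covered by a list of (start, stop) pairs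
noncomputable def pvU : List (Int × Int) → Finset Int :=
  fun l => l.foldr (fun p s => Finset.Ico p.1 p.2 ∪ s) ∅

theorem pvU_append (l₁ l₂ : List (Int × Int)) : pvU (l₁ ++ l₂) = pvU l₁ ∪ pvU l₂ := by
  induction l₁ with
  | nil => simp [pvU]
  | cons p t ih =>
    show Finset.Ico p.1 p.2 ∪ pvU (t ++ l₂) = (Finset.Ico p.1 p.2 ∪ pvU t) ∪ pvU l₂
    rw [ih, Finset.union_assoc]

theorem mem_pvU (l : List (Int × Int)) (x : Int) :
    x ∈ pvU l ↔ ∃ p ∈ l, p.1 ≤ x ∧ x < p.2 := by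
  induction l with
  | nil => simp [pvU]
  | cons p t ih =>
    show x ∈ Finset.Ico p.1 p.2 ∪ pvU t ↔ _
    rw [Finset.mem_union, ih]
    simp only [List.mem_cons, Finset.mem_Ico]
    constructor
    · rintro (h | ⟨q, hq, h1, h2⟩)
      · exact ⟨p, Or.inl rfl, h.1, h.2⟩
      · exact ⟨q, Or.inr hq, h1, h2⟩
    · rintro ⟨q, hq, h1, h2⟩
      rcases hq with rfl | hq
      · exact Or.inl ⟨h1, h2⟩
      · exact Or.inr ⟨q, hq, h1, h2⟩

theorem pvU_perm {l l' : List (Int × Int)} (h : l.Perm l') : pvU l = pvU l' := by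
  ext x; rw [mem_pvU, mem_pvU]
  constructor <;> rintro ⟨p, hp, h1, h2⟩
  · exact ⟨p, h.mem_iff.mp hp, h1, h2⟩
  · exact ⟨p, h.mem_iff.mpr hp, h1, h2⟩

theorem pvU_filter_pos (l : List (Int × Int)) :
    pvU (l.filter (fun p => decide (p.1 < p.2))) = pvU l := by
  ext x; rw [mem_pvU, mem_pvU]
  constructor <;> rintro ⟨p, hp, h1, h2⟩
  · exact ⟨p, (List.mem_filter.mp hp).1, h1, h2⟩
  · exact ⟨p, List.mem_filter.mpr ⟨hp, by simp; omega⟩, h1, h2⟩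

-- ----- A side -----

-- invariant of A's 'covered.add(j)' loop: the hash set realises a finite set, and
-- its size is that set's cardinality
theorem foldl_insert_spec (l : List Int) (s : Std.HashSet Int) (F : Finset Int)
    (hmem : ∀ y, y ∈ s ↔ y ∈ F) (hsz : s.size = F.card) :
    (∀ y, y ∈ l.foldl (fun c j => c.insert j) s ↔ y ∈ F ∪ l.toFinset) ∧
      (l.foldl (fun c j => c.insert j) s).size = (F ∪ l.toFinset).card := by
  induction l generalizing s F with
  | nil => simpa using ⟨hmem, hsz⟩
  | cons x t ih =>
    have hmem' : ∀ y, y ∈ s.insert x ↔ y ∈ insert x F := by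
      intro y
      rw [Std.HashSet.mem_insert, Finset.mem_insert, ← hmem y, beq_iff_eq]
      constructor <;> rintro (h | h)
      · exact Or.inl h.symm
      · exact Or.inr h
      · exact Or.inl h.symm
      · exact Or.inr h
    have hsz' : (s.insert x).size = (insert x F).card := by
      rw [Std.HashSet.size_insert]
      by_cases hx : x ∈ F
      · rw [if_pos ((hmem x).mpr hx), Finset.insert_eq_self.mpr hx, hsz]
      · rw [if_neg (fun h => hx ((hmem x).mp h)), Finset.card_insert_of_notMem hx, hsz]
    obtain ⟨m2, s2⟩ := ih (s.insert x) (insert x F) hmem' hsz'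
    have hF : insert x F ∪ t.toFinset = F ∪ (x :: t).toFinset := by
      ext y
      simp only [Finset.mem_union, Finset.mem_insert, List.mem_toFinset, List.mem_cons]
      tauto
    rw [List.foldl_cons, ← hF]
    exact ⟨m2, s2⟩

theorem pyRange_toFinset (a b : Int) : (PySem.List.pyRange a b).toFinset = Finset.Ico a b := by
  ext x; simp [List.mem_toFinset, PySem.List.mem_pyRange_one, Finset.mem_Ico]

theorem enumerate_append_one (x : List Int) (l : List (List Int)) :
    ∀ s : Int, PySem.List.enumerate (l ++ [x]) s = PySem.List.enumerate l s ++ [(s + l.length, x)] := by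
  induction l with
  | nil => intro s; simp [PySem.List.enumerate]
  | cons y t ih =>
    intro s
    show (s, y) :: PySem.List.enumerate (t ++ [x]) (s + 1) = (s, y) :: PySem.List.enumerate t (s + 1) ++ _
    rw [ih (s + 1)]
    push_cast [List.length_cons]
    ring_nf
    simp

theorem enumerate_append_singleton (x : List Int) (l : List (List Int)) :
    PySem.List.enumerate (l ++ [x]) = PySem.List.enumerate l ++ [((l.length : Int), x)] := by
  rw [show PySem.List.enumerate (l ++ [x]) = PySem.List.enumerate (l ++ [x]) 0 from rfl,
    enumerate_append_one x l 0]
  simp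

-- A's outer loop, named so that the proof can recurse on the interval list
def pvCov (intervals : List (List Int)) (fired : Int) : Std.HashSet Int :=
  (PySem.List.pyRange 0 (intervals.length : Int)).foldl
    (fun covered i =>
      if i ≠ fired then
        let interval := PySem.List.pyGetD intervals i []
        (PySem.List.pyRange (PySem.List.pyGetD interval 0 0) (PySem.List.pyGetD interval 1 0)).foldl
          (fun covered j => covered.insert j) covered
      else covered)
    Std.HashSet.emptyWithCapacity

theorem pvCov_spec (fired : Int) (intervals : List (List Int)) :
    (∀ y, y ∈ pvCov intervals fired ↔ y ∈ pvU (pvKeptAll intervals fired)) ∧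
      (pvCov intervals fired).size = (pvU (pvKeptAll intervals fired)).card := by
  induction intervals using List.reverseRecOn with
  | nil =>
    constructor
    · intro y
      simp [pvCov, pvKeptAll, pvU, PySem.List.pyRange, PySem.List.enumerate,
        Std.HashSet.not_mem_emptyWithCapacity]
    · simp [pvCov, pvKeptAll, pvU, PySem.List.pyRange, PySem.List.enumerate,
        Std.HashSet.size_emptyWithCapacity]
  | append_singleton l x ih =>
    obtain ⟨ihm, ihs⟩ := ih
    have hstep : pvCov (l ++ [x]) fired =
        (if (l.length : Int) ≠ fired then
          (PySem.List.pyRange (PySem.List.pyGetD x 0 0) (PySem.List.pyGetD x 1 0)).foldl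
            (fun covered j => covered.insert j) (pvCov l fired)
        else pvCov l fired) := by
      unfold pvCov
      rw [show ((l ++ [x]).length : Int) = (l.length : Int) + 1 by simp]
      rw [PySem.List.pyRange_one_succ_right (by positivity), List.foldl_append]
      have hlast : PySem.List.pyGetD (l ++ [x]) (l.length : Int) [] = x := by
        rw [PySem.List.pyGetD_of_nonneg _ _ (by positivity)]
        simp
      have hpart :
          (PySem.List.pyRange 0 (l.length : Int)).foldl
            (fun covered i =>
              if i ≠ fired then
                (PySem.List.pyRange (PySem.List.pyGetD (PySem.List.pyGetD (l ++ [x]) i []) 0 0)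
                  (PySem.List.pyGetD (PySem.List.pyGetD (l ++ [x]) i []) 1 0)).foldl
                  (fun covered j => covered.insert j) covered
              else covered)
            Std.HashSet.emptyWithCapacity = pvCov l fired := by
        unfold pvCov
        apply PySem.List.foldl_congr_mem
        intro acc i hi
        obtain ⟨h0, h1⟩ := PySem.List.mem_pyRange_one.mp hi
        have hget : PySem.List.pyGetD (l ++ [x]) i [] = PySem.List.pyGetD l i [] := by
          rw [PySem.List.pyGetD_of_nonneg _ _ h0, PySem.List.pyGetD_of_nonneg _ _ h0]
          exact List.getD_append _ _ _ _ (by omega)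
        rw [hget]
      simp only [List.foldl_cons, List.foldl_nil, hpart, hlast]
      rfl
    have hk : pvKeptAll (l ++ [x]) fired = pvKeptAll l fired ++
        (if (l.length : Int) ≠ fired then [(PySem.List.pyGetD x 0 0, PySem.List.pyGetD x 1 0)] else []) := by
      unfold pvKeptAll
      rw [enumerate_append_singleton, List.filter_append, List.map_append]
      congr 1
      by_cases hf : (l.length : Int) ≠ fired <;> simp [hf]
    have hU : pvU (pvKeptAll (l ++ [x]) fired) =
        pvU (pvKeptAll l fired) ∪ (if (l.length : Int) ≠ fired then
          Finset.Ico (PySem.List.pyGetD x 0 0) (PySem.List.pyGetD x 1 0) else ∅) := by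
      rw [hk, pvU_append]
      by_cases hf : (l.length : Int) ≠ fired <;> simp [hf, pvU]
    by_cases hf : (l.length : Int) ≠ fired
    · obtain ⟨m2, s2⟩ := foldl_insert_spec
        (PySem.List.pyRange (PySem.List.pyGetD x 0 0) (PySem.List.pyGetD x 1 0))
        (pvCov l fired) (pvU (pvKeptAll l fired)) ihm ihs
      rw [hstep, if_pos hf, hU, if_pos hf, ← pyRange_toFinset]
      exact ⟨m2, s2⟩
    · rw [hstep, if_neg hf, hU, if_neg hf]
      simpa using ⟨ihm, ihs⟩

theorem days_covered_eq (intervals : List (List Int)) (fired : Int) :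
    days_covered intervals fired = ((pvU (pvKeptAll intervals fired)).card : Int) := by
  obtain ⟨_, h2⟩ := pvCov_spec fired intervals
  show ((pvCov intervals fired).size : Int) = _
  rw [h2]

-- ----- B side -----

theorem pvSweep_some (l : List (Int × Int)) (total lo hi : Int)
    (hall : ∀ p ∈ l, p.1 < p.2) (hs : l.Pairwise (fun p q => p.1 ≤ q.1))
    (hlo : ∀ p ∈ l, lo ≤ p.1) (hlt : lo < hi) :
    pvSweep l total (some (lo, hi)) = total + ((Finset.Ico lo hi ∪ pvU l).card : Int) := by
  induction l generalizing total lo hi with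
  | nil =>
    simp [pvSweep, pvU, Int.card_Ico]
    omega
  | cons p t ih =>
    obtain ⟨a, b⟩ := p
    have hab : a < b := hall (a, b) (by simp)
    have hla : lo ≤ a := hlo (a, b) (by simp)
    have hsrest := (List.pairwise_cons.mp hs).2
    have hhead := (List.pairwise_cons.mp hs).1
    rw [show pvU ((a, b) :: t) = Finset.Ico a b ∪ pvU t from rfl]
    by_cases hgt : a > hi
    · rw [show pvSweep ((a, b) :: t) total (some (lo, hi))
          = pvSweep t (total + (hi - lo)) (some (a, b)) by simp [pvSweep, hgt]]
      rw [ih (total + (hi - lo)) a b (fun p hp => hall p (by simp [hp]))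
          hsrest (fun p hp => hhead p hp) hab]
      have hdisj : Disjoint (Finset.Ico lo hi) (Finset.Ico a b ∪ pvU t) := by
        rw [Finset.disjoint_left]
        intro x hx hx'
        have hxhi : x < hi := (Finset.mem_Ico.mp hx).2
        rcases Finset.mem_union.mp hx' with h | h
        · have := (Finset.mem_Ico.mp h).1; omega
        · obtain ⟨q, hq, hq1, _⟩ := (mem_pvU _ _).mp h
          have := hhead q hq; omega
      rw [Finset.card_union_of_disjoint hdisj, Int.card_Ico]
      push_cast
      omega
    · rw [not_lt] at hgt
      rw [show pvSweep ((a, b) :: t) total (some (lo, hi))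
          = pvSweep t total (some (lo, if b > hi then b else hi)) by simp [pvSweep]; omega]
      have hmerge : Finset.Ico lo hi ∪ (Finset.Ico a b ∪ pvU t)
          = Finset.Ico lo (if b > hi then b else hi) ∪ pvU t := by
        rw [← Finset.union_assoc]
        congr 1
        ext x
        simp only [Finset.mem_union, Finset.mem_Ico]
        split <;> omega
      rw [hmerge]
      exact ih total lo (if b > hi then b else hi)
        (fun p hp => hall p (by simp [hp])) hsrest
        (fun p hp => le_trans hla (hhead p hp)) (by split <;> omega)

theorem pvSweep_none (l : List (Int × Int))
    (hall : ∀ p ∈ l, p.1 < p.2) (hs : l.Pairwise (fun p q => p.1 ≤ q.1)) :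
    pvSweep l 0 none = ((pvU l).card : Int) := by
  cases l with
  | nil => simp [pvSweep, pvU]
  | cons p t =>
    obtain ⟨a, b⟩ := p
    rw [show pvSweep ((a, b) :: t) 0 none = pvSweep t 0 (some (a, b)) from rfl]
    rw [pvSweep_some t 0 a b (fun q hq => hall q (by simp [hq]))
      (List.pairwise_cons.mp hs).2 (fun q hq => (List.pairwise_cons.mp hs).1 q hq)
      (hall (a, b) (by simp))]
    simp [pvU]

theorem kept_filter (fired : Int) (l : List (Int × List Int)) :
    (l.filter (fun p => decide (p.1 ≠ fired ∧ PySem.List.pyGetD p.2 0 0 < PySem.List.pyGetD p.2 1 0))).map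
      (fun p => (PySem.List.pyGetD p.2 0 0, PySem.List.pyGetD p.2 1 0))
    = ((l.filter (fun p => decide (p.1 ≠ fired))).map
        (fun p => (PySem.List.pyGetD p.2 0 0, PySem.List.pyGetD p.2 1 0))).filter
        (fun q => decide (q.1 < q.2)) := by
  induction l with
  | nil => rfl
  | cons p t ih =>
    by_cases h1 : p.1 ≠ fired <;> by_cases h2 : PySem.List.pyGetD p.2 0 0 < PySem.List.pyGetD p.2 1 0 <;>
      · simp only [show ∀ (A B : Prop) (_ : Decidable A) (_ : Decidable B), decide (A ∧ B) = (decide A && decide B) from fun A B _ _ => by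
            by_cases A <;> by_cases B <;> simp [*], decide_not] at ih ⊢
        simp [h1, h2, ih]

theorem days_covered_alt_eq (intervals : List (List Int)) (fired : Int) :
    days_covered_alt intervals fired = ((pvU (pvKeptAll intervals fired)).card : Int) := by
  show pvSweep (PySem.List.sorted _ (fun t => t.1)) 0 none = _
  rw [PySem.List.foldl_append_ite
      (p := fun p : Int × List Int => p.1 ≠ fired ∧ PySem.List.pyGetD p.2 0 0 < PySem.List.pyGetD p.2 1 0)
      (f := fun p => (PySem.List.pyGetD p.2 0 0, PySem.List.pyGetD p.2 1 0))]
  rw [List.nil_append, kept_filter fired]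
  show pvSweep (PySem.List.sorted ((pvKeptAll intervals fired).filter (fun q => decide (q.1 < q.2))) (fun t => t.1)) 0 none = _
  set kept0 := ((pvKeptAll intervals fired).filter (fun q => decide (q.1 < q.2))) with hkept0
  have hmemk : ∀ q ∈ kept0, q.1 < q.2 := by
    intro q hq
    have := (List.mem_filter.mp hq).2
    simpa using this
  have hperm := PySem.List.sorted_perm kept0 (fun t : Int × Int => t.1) false
  rw [pvSweep_none _ (fun q hq => hmemk q (hperm.mem_iff.mp hq))
      (PySem.List.sorted_pairwise kept0 (fun t : Int × Int => t.1))]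
  rw [pvU_perm hperm, hkept0, pvU_filter_pos]

-- ===== VERDICT (by name: the statement is the Claim_ definition above) =====
theorem days_covered_spec : Claim_equal_days_covered := by
  intro intervals fired _ _
  show days_covered intervals fired = days_covered_alt intervals fired
  rw [days_covered_eq, days_covered_alt_eq]
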